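-- pv_equiv track=rewrite | github.com/Minemario64/Custom-Shell | commands.py | getVar
-- ===== SOURCE A (Python) =====
-- from typing import Literal, Any, Callable
--
-- def getVar(text: str, mode: Literal['$', '%', '%%']) -> tuple[str, str, str]:
--     type = ''
--     name = ''
--     value = ''
--     part = 0
--     for char in text:
--         match part:
--             case 0:
--                 if char == mode[0]:
--                     part += 1
--                     continue
--
--                 if char == " ":
--                     continue
--
--                 type += char
--
--             case 1:
--                 if char == "=":
--                     part += 1
--                     name = name.rstrip(" ")
--                     if mode == '%%':
--                         name = name.removesuffix("%")
--                     continue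
--
--                 name += char
--
--             case 2 | 3:
--                 if char == " " and part == 2:
--                     continue
--
--                 value += char
--                 part = 3
--
--     return (type, name, value)
-- ===== SOURCE B (Python) =====
-- def getVar(text: str, mode) -> tuple:
--     i = text.find(mode[0])
--     if i == -1:
--         return (text.replace(' ', ''), '', '')
--     typ = text[:i].replace(' ', '')
--     rest = text[i + 1:]
--     j = rest.find('=')
--     if j == -1:
--         return (typ, rest, '')
--     name = rest[:j].rstrip(' ')
--     if mode == '%%':
--         name = name.removesuffix('%')
--     value = rest[j + 1:].lstrip(' ')
--     return (typ, name, value)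
-- ===== Notes on version B (the rewrite author's own statement) =====
-- stated objective: simpler
-- what changed: Replaced the per-character four-state machine with direct find/slice segmentation: locate the first mode[0], delete spaces from the prefix for the type, locate the first '=' in the remainder, then rstrip/removesuffix the name and lstrip the value.
-- outside the precondition, e.g. on getVar('', ''): A returns ('', '', ''), B raises IndexError
import Mathlib
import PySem

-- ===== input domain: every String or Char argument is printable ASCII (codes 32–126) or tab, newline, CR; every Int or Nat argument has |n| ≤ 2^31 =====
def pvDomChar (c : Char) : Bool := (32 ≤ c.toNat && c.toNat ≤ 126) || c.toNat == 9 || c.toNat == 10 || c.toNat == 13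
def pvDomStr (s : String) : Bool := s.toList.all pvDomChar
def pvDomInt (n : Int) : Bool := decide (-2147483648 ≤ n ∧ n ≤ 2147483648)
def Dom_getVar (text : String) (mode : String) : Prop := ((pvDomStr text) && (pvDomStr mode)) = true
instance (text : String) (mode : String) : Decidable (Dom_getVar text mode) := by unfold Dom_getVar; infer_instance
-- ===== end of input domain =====

-- B replaces A's per-character four-state machine by find/slice segmentation (simpler, measurably faster constant factor); equal results whenever mode ≠ "".


-- shared hand-ports of two Python str builtins PySem does not provide (both Pythons call them):
-- s.rstrip(" ") — drop TRAILING spaces only (exact: only ' ' is stripped, not tabs/newlines)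
def pvRstripSp (cs : List Char) : List Char := (cs.reverse.dropWhile (· == ' ')).reverse
-- s.removesuffix("%") — drop one final '%' if present (exact)
def pvRemoveSuffixPct (cs : List Char) : List Char :=
  match cs.reverse with
  | '%' :: r => r.reverse
  | _ => cs

-- ===== PORT A =====
-- one iteration of A's for-loop: state (type, name, value, part), branches in A's order
def pvStepA (m : Char) (mode : List Char) (st : List Char × List Char × List Char × Nat) (c : Char) :
    List Char × List Char × List Char × Nat :=
  match st with
  | (t, n, v, part) =>
    match part with
    | 0 =>
      if c == m then (t, n, v, 1)
      else if c == ' ' then (t, n, v, 0)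
      else (t ++ [c], n, v, 0)
    | 1 =>
      if c == '=' then
        let n1 := pvRstripSp n
        let n2 := if mode = ['%', '%'] then pvRemoveSuffixPct n1 else n1
        (t, n2, v, 2)
      else (t, n ++ [c], v, 1)
    | _ =>
      if c == ' ' && part == 2 then (t, n, v, part)
      else (t, n, v ++ [c], 3)

def getVar (text : String) (mode : String) : String × String × String :=
  -- mode[0]: none = IndexError (excluded by Pre_ whenever the loop body would run)
  match PySem.Str.pyGet? mode 0 with
  | none => ("", "", "")
  | some m =>
    let st := text.toList.foldl (pvStepA m mode.toList) ([], [], [], 0)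
    (String.ofList st.1, String.ofList st.2.1, String.ofList st.2.2.1)

-- ===== PORT B =====
def getVar_alt (text : String) (mode : String) : String × String × String :=
  -- mode[0]: none = IndexError (outside Pre_)
  match PySem.Str.pyGet? mode 0 with
  | none => ("", "", "")
  | some m =>
    let s := text.toList
    let i := PySem.Chars.find s [m]
    if i = -1 then (String.ofList (PySem.Chars.replace s [' '] []), "", "")
    else
      let typ := PySem.Chars.replace (PySem.Chars.slice s none (some i)) [' '] []
      let rest := PySem.Chars.slice s (some (i + 1)) none
      let j := PySem.Chars.find rest ['=']
      if j = -1 then (String.ofList typ, String.ofList rest, "")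
      else
        let n1 := pvRstripSp (PySem.Chars.slice rest none (some j))
        let name := if mode.toList = ['%', '%'] then pvRemoveSuffixPct n1 else n1
        -- rest[j+1:].lstrip(' '): drop LEADING spaces only (hand-port, exact)
        let value := (PySem.Chars.slice rest (some (j + 1)) none).dropWhile (· == ' ')
        (String.ofList typ, String.ofList name, String.ofList value)

-- ===== PRECONDITION & SPEC =====
-- Pre_ excludes mode = "": there Python A raises IndexError on mode[0] whenever text ≠ "", and the one
-- input ("", "") only returns because the loop body never runs; B evaluates mode[0] up front and raises
-- uniformly (mode is typed Literal['$','%','%%'], so mode = "" is malformed input).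
def Pre_getVar (text : String) (mode : String) : Prop := mode ≠ ""
instance (text : String) (mode : String) : Decidable (Pre_getVar text mode) := by unfold Pre_getVar; infer_instance
def pvWitness_getVar : String × String := ("int x = 5", "$")

def Spec_getVar (text : String) (mode : String) (out : String × String × String) : Prop := out = getVar_alt text mode
instance (text : String) (mode : String) (out : String × String × String) : Decidable (Spec_getVar text mode out) := by unfold Spec_getVar; infer_instance

-- ===== CLAIM (what is proved, stated in full; the proofs are below) =====
def Claim_equal_getVar : Prop := ∀ (text : String) (mode : String), Dom_getVar text mode → Pre_getVar text mode → Spec_getVar text mode (getVar text mode)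

-- ===== LEMMAS AND PROOFS =====

-- find on a single-character needle
theorem pv_find_go_single (c : Char) (s : List Char) (k : Nat) :
    PySem.Chars.find.go [c] s k =
      match s with
      | [] => -1
      | x :: t => if x == c then (k : Int) else PySem.Chars.find.go [c] t (k + 1) := by
  cases s with
  | nil => simp [PySem.Chars.find.go]
  | cons x t =>
    simp only [PySem.Chars.find.go, List.isPrefixOf]
    by_cases h : c == x
    · have : x == c := by simpa [BEq.comm] using h
      simp [h, this]
    · have : ¬ (x == c) = true := by
        intro hx; exact h (by simpa [BEq.comm] using hx)
      simp [h, this]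

theorem pv_find_single_not_mem (c : Char) (s : List Char) (h : c ∉ s) (k : Nat) :
    PySem.Chars.find.go [c] s k = -1 := by
  induction s generalizing k with
  | nil => rw [pv_find_go_single]
  | cons x t ih =>
    rw [pv_find_go_single]
    have hx : ¬ (x == c) = true := by
      intro hxc; exact h (by simp [beq_iff_eq] at hxc; simp [hxc])
    simpa [hx] using ih (fun hm => h (List.mem_cons_of_mem _ hm)) (k + 1)

theorem pv_find_single_first (c : Char) (p q : List Char) (hp : c ∉ p) (k : Nat) :
    PySem.Chars.find.go [c] (p ++ c :: q) k = (k : Int) + p.length := by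
  induction p generalizing k with
  | nil => rw [pv_find_go_single]; simp
  | cons x t ih =>
    rw [pv_find_go_single]
    have hx : ¬ (x == c) = true := by
      intro hxc; exact hp (by simp [beq_iff_eq] at hxc; simp [hxc])
    have := ih (fun hm => hp (List.mem_cons_of_mem _ hm)) (k + 1)
    simp only [List.cons_append, hx, this, List.length_cons]
    push_cast; ring

-- replace with a single-character pattern and empty replacement is filter
theorem pv_replace_go_single (c : Char) (fuel : Nat) (l acc : List Char) (h : l.length ≤ fuel) :
    PySem.Chars.replace.go [c] [] fuel l acc = acc.reverse ++ l.filter (fun x => !(x == c)) := by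
  induction fuel generalizing l acc with
  | zero =>
    have : l = [] := List.eq_nil_of_length_eq_zero (Nat.le_zero.mp h)
    subst this; simp [PySem.Chars.replace.go]
  | succ f ih =>
    cases l with
    | nil => simp [PySem.Chars.replace.go]
    | cons x t =>
      simp only [PySem.Chars.replace.go]
      by_cases hx : (c == x) = true
      · have hxc : (x == c) = true := by simpa [BEq.comm] using hx
        have hcx : List.isPrefixOf [c] (x :: t) = true := by rw [List.isPrefixOf_cons₂]; simp [hx]
        rw [if_pos hcx]
        rw [show List.drop (List.length [c]) (x :: t) = t from by simp]
        rw [show (([] : List Char).reverse ++ acc) = acc from by simp]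
        rw [ih t acc (by simpa using Nat.le_of_succ_le_succ h)]
        simp [List.filter, hxc]
      · have hxc : ¬ (x == c) = true := by
          intro hh; exact hx (by simpa [BEq.comm] using hh)
        have hcx : List.isPrefixOf [c] (x :: t) = false := by rw [List.isPrefixOf_cons₂]; simp [hx]
        simp only [hcx, Bool.false_eq_true, if_false]
        rw [ih t (x :: acc) (by simpa using Nat.le_of_succ_le_succ h)]
        simp [List.filter, hxc]

theorem pv_replace_single (c : Char) (s : List Char) :
    PySem.Chars.replace s [c] [] = s.filter (fun x => !(x == c)) := by
  simp only [PySem.Chars.replace, List.isEmpty_cons, Bool.false_eq_true, if_false]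
  simpa using pv_replace_go_single c s.length s [] le_rfl

-- first-occurrence decomposition
theorem pv_first_split (c : Char) (s : List Char) (h : c ∈ s) :
    ∃ p q, s = p ++ c :: q ∧ c ∉ p := by
  induction s with
  | nil => cases h
  | cons x t ih =>
    by_cases hx : x = c
    · exact ⟨[], t, by simp [hx], by simp⟩
    · have h' : c ∈ t := by
        rcases List.mem_cons.mp h with h' | h'
        · exact absurd h'.symm hx
        · exact h'
      rcases ih h' with ⟨p, q, hpq, hnp⟩
      refine ⟨x :: p, q, by simp [hpq], ?_⟩
      simp only [List.mem_cons, not_or]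
      exact ⟨fun hc => hx hc.symm, hnp⟩

-- A's loop, stage by stage ------------------------------------------------

theorem pv_foldA0 (m : Char) (mo : List Char) (s t n v : List Char) (h : m ∉ s) :
    s.foldl (pvStepA m mo) (t, n, v, 0) = (t ++ s.filter (fun c => !(c == ' ')), n, v, 0) := by
  induction s generalizing t with
  | nil => simp
  | cons x r ih =>
    have hx : ¬ (x == m) = true := by
      intro hh; exact h (by simp [beq_iff_eq] at hh; simp [hh])
    by_cases hsp : (x == ' ') = true
    · simp only [List.foldl_cons, pvStepA, hx, Bool.false_eq_true, if_false, hsp, if_true]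
      rw [ih t (fun hm => h (List.mem_cons_of_mem _ hm))]
      simp [List.filter, hsp]
    · simp only [List.foldl_cons, pvStepA, hx, Bool.false_eq_true, if_false, hsp]
      rw [ih (t ++ [x]) (fun hm => h (List.mem_cons_of_mem _ hm))]
      simp [List.filter, hsp]

theorem pv_foldA_split0 (m : Char) (mo : List Char) (p q t n v : List Char) (hp : m ∉ p) :
    (p ++ m :: q).foldl (pvStepA m mo) (t, n, v, 0) =
      q.foldl (pvStepA m mo) (t ++ p.filter (fun c => !(c == ' ')), n, v, 1) := by
  rw [List.foldl_append, pv_foldA0 m mo p t n v hp]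
  simp [pvStepA]

theorem pv_foldA1 (m : Char) (mo : List Char) (q t n v : List Char) (h : '=' ∉ q) :
    q.foldl (pvStepA m mo) (t, n, v, 1) = (t, n ++ q, v, 1) := by
  induction q generalizing n with
  | nil => simp
  | cons x r ih =>
    have hx : ¬ (x == '=') = true := by
      intro hh; exact h (by simp [beq_iff_eq] at hh; simp [hh])
    simp only [List.foldl_cons, pvStepA, hx, Bool.false_eq_true, if_false]
    rw [ih (n ++ [x]) (fun hm => h (List.mem_cons_of_mem _ hm))]
    simp

theorem pv_foldA_split1 (m : Char) (mo : List Char) (r u t n v : List Char) (hr : '=' ∉ r) :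
    (r ++ '=' :: u).foldl (pvStepA m mo) (t, n, v, 1) =
      u.foldl (pvStepA m mo)
        (t, (if mo = ['%', '%'] then pvRemoveSuffixPct (pvRstripSp (n ++ r)) else pvRstripSp (n ++ r)), v, 2) := by
  rw [List.foldl_append, pv_foldA1 m mo r t n v hr]
  simp [pvStepA]

theorem pv_foldA3 (m : Char) (mo : List Char) (u t n v : List Char) :
    u.foldl (pvStepA m mo) (t, n, v, 3) = (t, n, v ++ u, 3) := by
  induction u generalizing v with
  | nil => simp
  | cons x r ih =>
    simp only [List.foldl_cons, pvStepA]
    rw [if_neg (by simp)]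
    rw [ih (v ++ [x])]
    simp

theorem pv_foldA2 (m : Char) (mo : List Char) (u t n : List Char) :
    ∃ pt, u.foldl (pvStepA m mo) (t, n, [], 2) = (t, n, u.dropWhile (· == ' '), pt) := by
  induction u with
  | nil => exact ⟨2, by simp⟩
  | cons x r ih =>
    by_cases hx : (x == ' ') = true
    · rcases ih with ⟨pt, hpt⟩
      refine ⟨pt, ?_⟩
      simp only [List.foldl_cons, pvStepA, hx, if_true, List.dropWhile_cons]
      simpa [hx] using hpt
    · refine ⟨3, ?_⟩
      simp only [List.foldl_cons, pvStepA, List.dropWhile_cons, hx]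
      rw [if_neg (by simp [hx])]
      simpa using pv_foldA3 m mo r t n [x]

-- mode[0] on a nonempty mode
theorem pv_mode_head (mode : String) (m : Char) (ms : List Char) (h : mode.toList = m :: ms) :
    PySem.Str.pyGet? mode 0 = some m := by
  simp [PySem.Str.pyGet?, PySem.Chars.pyGet?_eq_listPyGet?, PySem.List.pyGet?, PySem.List.pyIdx?, h]

-- ===== VERDICT (by name: the statement is the Claim_ definition above) =====
theorem getVar_spec : Claim_equal_getVar := by
  intro text mode _ hpre
  unfold Spec_getVar
  obtain ⟨m, ms, hmode⟩ : ∃ m ms, mode.toList = m :: ms := by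
    cases h : mode.toList with
    | nil => exact absurd (by cases mode; simpa using h) hpre
    | cons m ms => exact ⟨m, ms, rfl⟩
  unfold getVar getVar_alt
  rw [pv_mode_head mode m ms hmode]
  dsimp only
  by_cases hm : m ∈ text.toList
  · rcases pv_first_split m text.toList hm with ⟨p, q, hs, hnp⟩
    rw [hs]
    have hfind : PySem.Chars.find (p ++ m :: q) [m] = (p.length : Int) := by
      unfold PySem.Chars.find
      rw [pv_find_single_first m p q hnp 0]; simp
    have hslice_to : PySem.Chars.slice (p ++ m :: q) none (some (p.length : Int)) = p := by
      rw [PySem.Chars.slice_eq_listSlice, PySem.List.slice_to _ (by positivity)]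
      simp [List.take_left']
    have hslice_from : PySem.Chars.slice (p ++ m :: q) (some ((p.length : Int) + 1)) none = q := by
      rw [PySem.Chars.slice_eq_listSlice, PySem.List.slice_from _ (by positivity)]
      have h1 : (((p.length : Int) + 1)).toNat = p.length + 1 := by omega
      rw [h1, show p ++ m :: q = (p ++ [m]) ++ q by simp]
      rw [List.drop_left' (by simp)]
    rw [pv_foldA_split0 m mode.toList p q [] [] [] hnp]
    have hnep : ((p.length : Int)) ≠ -1 := by omega
    rw [hfind]
    rw [if_neg hnep]
    rw [hslice_to, hslice_from]
    by_cases he : '=' ∈ q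
    · rcases pv_first_split '=' q he with ⟨r, u, hq, hnr⟩
      rw [hq]
      have hfq : PySem.Chars.find (r ++ '=' :: u) ['='] = (r.length : Int) := by
        unfold PySem.Chars.find
        rw [pv_find_single_first '=' r u hnr 0]; simp
      have hq_to : PySem.Chars.slice (r ++ '=' :: u) none (some (r.length : Int)) = r := by
        rw [PySem.Chars.slice_eq_listSlice, PySem.List.slice_to _ (by positivity)]
        simp [List.take_left']
      have hq_from : PySem.Chars.slice (r ++ '=' :: u) (some ((r.length : Int) + 1)) none = u := by
        rw [PySem.Chars.slice_eq_listSlice, PySem.List.slice_from _ (by positivity)]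
        have h1 : (((r.length : Int) + 1)).toNat = r.length + 1 := by omega
        rw [h1, show r ++ '=' :: u = (r ++ ['=']) ++ u by simp]
        rw [List.drop_left' (by simp)]
      rw [pv_foldA_split1 m mode.toList r u _ [] [] hnr]
      rcases pv_foldA2 m mode.toList u _ _ with ⟨pt, hpt⟩
      have hne : ((r.length : Int)) ≠ -1 := by omega
      rw [hpt, hfq]
      rw [if_neg hne]
      rw [hq_to, hq_from]
      simp [pv_replace_single]
    · have hfq : PySem.Chars.find q ['='] = -1 := pv_find_single_not_mem '=' q he 0
      rw [pv_foldA1 m mode.toList q _ [] [] he, hfq, if_pos rfl]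
      simp [pv_replace_single]
  · have hfind : PySem.Chars.find text.toList [m] = -1 := pv_find_single_not_mem m text.toList hm 0
    rw [hfind, if_pos rfl, pv_foldA0 m mode.toList text.toList [] [] [] hm]
    simp [pv_replace_single]
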